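-- pv_equiv track=rewrite | github.com/vicjor/aoc | 2021/7.py | cheapest_alignment
-- ===== SOURCE A (Python) =====
-- from typing import List
--
-- def cheapest_alignment(positions: List[int]) -> int:
--     _max = max(positions)
--     _min = min(positions)
--     cheapest = 99999999999999999
--     for i in range(_min, _max):
--         temp = 0
--         for pos in positions:
--             temp += abs(pos-i)
--         if temp < cheapest:
--             cheapest = temp
--         temp = 0
--     return cheapest
-- ===== SOURCE B (Python) =====
-- def cheapest_alignment(positions):
--     _min = min(positions)
--     _max = max(positions)
--     n = len(positions)
--     cnt = {}
--     for p in positions: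
--         cnt[p] = cnt.get(p, 0) + 1
--     cost = 0
--     for p in positions:
--         cost += p - _min
--     cheapest = 99999999999999999
--     j = 0
--     for i in range(_min, _max):
--         j += cnt.get(i, 0)
--         if cost < cheapest:
--             cheapest = cost
--         cost += 2 * j - n
--     return cheapest
-- ===== Notes on version B (the rewrite author's own statement) =====
-- stated objective: faster
-- what changed: replaces the nested rescan of all positions at every candidate point by a counting dictionary plus an incremental cost update (cost(i+1) = cost(i) + 2*#{p<=i} - n), so the inner loop over positions disappears
import Mathlib
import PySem

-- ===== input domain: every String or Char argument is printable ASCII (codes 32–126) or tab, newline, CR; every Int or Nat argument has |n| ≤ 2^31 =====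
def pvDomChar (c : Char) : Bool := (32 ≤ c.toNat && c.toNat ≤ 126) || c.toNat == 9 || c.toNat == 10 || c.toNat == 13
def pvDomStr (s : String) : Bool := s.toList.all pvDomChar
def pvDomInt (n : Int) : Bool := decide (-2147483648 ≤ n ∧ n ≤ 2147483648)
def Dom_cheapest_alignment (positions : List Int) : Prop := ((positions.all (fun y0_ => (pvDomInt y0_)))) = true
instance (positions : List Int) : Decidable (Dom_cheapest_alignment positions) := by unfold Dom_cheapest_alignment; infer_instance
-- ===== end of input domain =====

-- B replaces A's rescan of all positions at every candidate point by a counter dict and an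
-- incremental cost update; the return value is proved equal for every non-empty input.

-- ===== PORT A =====
-- A's loop body: try each candidate i, recompute the whole distance sum, keep the minimum.
def aStep (positions : List Int) (cheapest i : Int) : Int :=
  let temp := positions.foldl (fun t p => t + |p - i|) 0
  if temp < cheapest then temp else cheapest

def cheapest_alignment (positions : List Int) : Int :=
  match PySem.List.max? positions (fun y => y), PySem.List.min? positions (fun y => y) with
  | some mx, some mn =>
      (PySem.List.pyRange mn mx 1).foldl (aStep positions) 99999999999999999
  | _, _ => 0   -- unreachable: positions ≠ [] by Pre_

-- ===== PORT B =====
-- B's loop body over state (cheapest, cost, j): j += cnt.get(i,0); update cheapest; cost += 2*j - n.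
def bStep (cnt : PySem.Dict Int Int) (n : Int) (st : Int × Int × Int) (i : Int) : Int × Int × Int :=
  let j := st.2.2 + cnt.getD i 0
  ((if st.2.1 < st.1 then st.2.1 else st.1), st.2.1 + 2 * j - n, j)

def cheapest_alignment_alt (positions : List Int) : Int :=
  match PySem.List.min? positions (fun y => y) with
  | none => 0   -- unreachable: positions ≠ [] by Pre_
  | some mn =>
    match PySem.List.max? positions (fun y => y) with
    | none => 0   -- unreachable: positions ≠ [] by Pre_
    | some mx =>
      let n : Int := positions.length
      let cnt : PySem.Dict Int Int :=
        positions.foldl (fun d p => d.insert p (d.getD p 0 + 1)) PySem.Dict.empty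
      let cost0 := positions.foldl (fun s p => s + (p - mn)) 0
      let st := (PySem.List.pyRange mn mx 1).foldl (bStep cnt n) (99999999999999999, cost0, 0)
      st.1

-- ===== PRECONDITION & SPEC =====
-- Pre_ excludes exactly the empty list, on which Python's max() raises ValueError (in B too).
def Pre_cheapest_alignment (positions : List Int) : Prop := positions ≠ []
instance (positions : List Int) : Decidable (Pre_cheapest_alignment positions) := by
  unfold Pre_cheapest_alignment; infer_instance
def pvWitness_cheapest_alignment : List Int := [16, 1, 2, 0, 4, 2, 7, 1, 2, 14]

def Spec_cheapest_alignment (positions : List Int) (out : Int) : Prop := out = cheapest_alignment_alt positions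
instance (positions : List Int) (out : Int) : Decidable (Spec_cheapest_alignment positions out) := by unfold Spec_cheapest_alignment; infer_instance

-- ===== CLAIM (what is proved, stated in full; the proofs are below) =====
def Claim_equal_cheapest_alignment : Prop := ∀ (positions : List Int), Dom_cheapest_alignment positions → Pre_cheapest_alignment positions → Spec_cheapest_alignment positions (cheapest_alignment positions)

-- ===== LEMMAS AND PROOFS =====

-- A's inner loop is the sum of distances.
lemma foldl_abs_sum (ps : List Int) (i : Int) :
    ps.foldl (fun t p => t + |p - i|) 0 = (ps.map (fun p => |p - i|)).sum := by
  simpa using PySem.List.foldl_add (l := ps) (g := fun p => |p - i|) (a := 0)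

-- cost step: moving the target from i to i+1 changes the total by 2*#{p ≤ i} - n.
lemma cost_step (ps : List Int) (i : Int) :
    (ps.map (fun p => |p - (i + 1)|)).sum
      = (ps.map (fun p => |p - i|)).sum + 2 * (ps.countP (fun p => decide (p ≤ i)) : Int) - ps.length := by
  induction ps with
  | nil => simp
  | cons p t ih =>
      simp only [List.map_cons, List.sum_cons, List.countP_cons, List.length_cons]
      by_cases h : p ≤ i
      · rw [abs_of_nonpos (by omega), abs_of_nonpos (by omega)]
        simp only [h, decide_true]
        push_cast
        omega
      · rw [abs_of_nonneg (by omega), abs_of_nonneg (by omega)]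
        simp only [h, decide_false]
        push_cast
        omega

-- count step: #{p ≤ i} = #{p ≤ i-1} + #{p = i}.
lemma count_step (ps : List Int) (i : Int) :
    ps.countP (fun p => decide (p ≤ i)) = ps.countP (fun p => decide (p ≤ i - 1)) + ps.count i := by
  induction ps with
  | nil => simp
  | cons p t ih =>
      simp only [List.countP_cons, List.count_cons, ih]
      by_cases h1 : p ≤ i - 1
      · simp [h1, show p ≤ i by omega, show ¬ (p = i) by omega]
        omega
      · by_cases h2 : p = i
        · simp [h2]
          omega
        · simp [h1, h2, show ¬ (p ≤ i) by omega]

-- the main loop invariant: B's fold carries (cheapest, cost at i, #{p ≤ i-1}) and its first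
-- component tracks A's running minimum.
lemma loop_eq (ps : List Int) (k : Nat) : ∀ (i mx c : Int), (mx - i).toNat = k →
    ((PySem.List.pyRange i mx 1).foldl
        (bStep (ps.foldl (fun d p => d.insert p (d.getD p 0 + 1)) PySem.Dict.empty) ps.length)
        (c, (ps.map (fun p => |p - i|)).sum, (ps.countP (fun p => decide (p ≤ i - 1)) : Int))).1
    = (PySem.List.pyRange i mx 1).foldl (aStep ps) c := by
  induction k with
  | zero =>
      intro i mx c hk
      rw [PySem.List.pyRange_one_eq_nil (by omega)]
      rfl
  | succ k ih =>
      intro i mx c hk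
      rw [PySem.List.pyRange_one_cons (by omega)]
      simp only [List.foldl_cons]
      have hj : ((ps.countP (fun p => decide (p ≤ i - 1)) : Nat) : Int) + (0 + (ps.count i : Int))
          = ((ps.countP (fun p => decide (p ≤ i)) : Nat) : Int) := by
        rw [count_step ps i]
        push_cast
        ring
      have hstep : bStep (ps.foldl (fun d p => d.insert p (d.getD p 0 + 1)) PySem.Dict.empty)
            ps.length
            (c, (ps.map (fun p => |p - i|)).sum, (ps.countP (fun p => decide (p ≤ i - 1)) : Int)) i
          = ((aStep ps c i), (ps.map (fun p => |p - (i + 1)|)).sum,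
             (ps.countP (fun p => decide (p ≤ i)) : Int)) := by
        simp only [bStep, aStep, PySem.Dict.getD_foldl_insert_add_one, PySem.Dict.getD_empty,
          foldl_abs_sum]
        rw [hj, cost_step ps i]
      have ih' := ih (i + 1) mx (aStep ps c i) (by omega)
      rw [show i + 1 - 1 = i from by ring] at ih'
      rw [hstep]
      exact ih'

-- ===== VERDICT (by name: the statement is the Claim_ definition above) =====
theorem cheapest_alignment_spec : Claim_equal_cheapest_alignment := by
  intro ps _ hpre
  unfold Spec_cheapest_alignment cheapest_alignment cheapest_alignment_alt
  obtain ⟨mn, hmn⟩ : ∃ mn, PySem.List.min? ps (fun y => y) = some mn := by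
    cases h : PySem.List.min? ps (fun y => y) with
    | none => exact absurd ((PySem.List.min?_eq_none_iff _ _).mp h) hpre
    | some m => exact ⟨m, rfl⟩
  obtain ⟨mx, hmx⟩ : ∃ mx, PySem.List.max? ps (fun y => y) = some mx := by
    cases h : PySem.List.max? ps (fun y => y) with
    | none => exact absurd ((PySem.List.max?_eq_none_iff _ _).mp h) hpre
    | some m => exact ⟨m, rfl⟩
  rw [hmn, hmx]
  simp only
  have hmin : ∀ p ∈ ps, mn ≤ p := fun p hp => PySem.List.min?_isMin hmn p hp
  have hcost0 : ps.foldl (fun s p => s + (p - mn)) 0 = (ps.map (fun p => |p - mn|)).sum := by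
    rw [show (ps.map (fun p => |p - mn|)) = ps.map (fun p => p - mn) from
      List.map_congr_left (fun p hp => abs_of_nonneg (by have := hmin p hp; omega))]
    simpa using PySem.List.foldl_add (l := ps) (g := fun p => p - mn) (a := 0)
  have hcnt0 : ((ps.countP (fun p => decide (p ≤ mn - 1)) : Nat) : Int) = 0 := by
    have h0 : ps.countP (fun p => decide (p ≤ mn - 1)) = 0 := by
      rw [List.countP_eq_zero]
      intro p hp
      have := hmin p hp
      simp
      omega
    rw [h0]
    rfl
  have h := loop_eq ps (mx - mn).toNat mn mx 99999999999999999 rfl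
  rw [hcnt0, ← hcost0] at h
  exact h.symm
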